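-- pv_equiv track=rewrite | github.com/joelaforet/polyzymd | src/polyzymd/analysis/contacts/binding_preference.py | _detect_overlapping_groups
-- ===== SOURCE A (Python) =====
-- def _detect_overlapping_groups(groups: dict[str, set[int]]) -> list[tuple[str, str]]:
--     """Detect pairs of groups that share residue IDs.
--
--     Parameters
--     ----------
--     groups : dict[str, set[int]]
--         Mapping of group name to residue IDs
--
--     Returns
--     -------
--     list[tuple[str, str]]
--         List of (group_a, group_b) pairs that have overlapping residue IDs
--     """
--     group_names = list(groups.keys())
--     overlaps = []
--
--     for i, g1 in enumerate(group_names):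
--         for g2 in group_names[i + 1 :]:
--             if groups[g1] & groups[g2]:  # Non-empty intersection
--                 overlaps.append((g1, g2))
--
--     return overlaps
-- ===== SOURCE B (Python) =====
-- def _detect_overlapping_groups(groups):
--     names = list(groups.keys())
--     index = {}  # residue id -> ascending list of indices of groups containing it
--     for gi, name in enumerate(names):
--         for r in groups[name]:
--             index.setdefault(r, []).append(gi)
--     pairs = set()
--     for gis in index.values():
--         for a in range(len(gis)):
--             for b in range(a + 1, len(gis)):
--                 pairs.add((gis[a], gis[b]))
--     return [(names[i], names[j]) for i, j in sorted(pairs)]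
-- ===== Notes on version B (the rewrite author's own statement) =====
-- stated objective: faster
-- what changed: A compares every pair of groups by set intersection (O(G^2*S)); B builds an inverted index residue->ascending group indices in one pass, collects co-occurring index pairs into a set, sorts them and maps back to names.
import Mathlib
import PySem

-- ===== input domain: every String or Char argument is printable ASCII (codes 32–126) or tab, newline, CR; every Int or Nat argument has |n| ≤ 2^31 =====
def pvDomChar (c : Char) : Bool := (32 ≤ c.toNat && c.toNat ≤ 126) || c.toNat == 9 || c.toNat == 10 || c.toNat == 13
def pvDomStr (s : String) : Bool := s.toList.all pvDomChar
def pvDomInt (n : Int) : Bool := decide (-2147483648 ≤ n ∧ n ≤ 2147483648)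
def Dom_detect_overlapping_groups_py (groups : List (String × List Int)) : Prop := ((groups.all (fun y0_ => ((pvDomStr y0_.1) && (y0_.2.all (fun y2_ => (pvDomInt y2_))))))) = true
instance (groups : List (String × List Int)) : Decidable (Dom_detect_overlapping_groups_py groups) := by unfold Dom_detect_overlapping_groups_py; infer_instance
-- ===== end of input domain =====

-- B replaces A's quadratic all-pairs set-intersection scan by an inverted index
-- residue -> group indices, collecting co-occurring index pairs into a set and
-- sorting them (objective: faster on inputs where few groups share a residue).

-- ===== PORT A =====
def detect_overlapping_groups_py (groups : List (String × List Int)) : List (String × String) :=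
  let d := PySem.Dict.mk groups
  let group_names := d.keys
  let overlaps : List (String × String) := []
  (PySem.List.enumerate group_names).foldl
    (fun overlaps p =>
      (PySem.List.slice group_names (some (p.1 + 1)) none).foldl
        (fun overlaps g2 =>
          if PySem.Set.inter (d.getD p.2 []) (d.getD g2 []) ≠ [] then
            overlaps ++ [(p.2, g2)]
          else overlaps)
        overlaps)
    overlaps

-- ===== PORT B =====
def detect_overlapping_groups_py_alt (groups : List (String × List Int)) : List (String × String) :=
  let d := PySem.Dict.mk groups
  let names := d.keys
  let index : PySem.Dict Int (List Int) :=
    (PySem.List.enumerate names).foldl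
      (fun index p =>
        (d.getD p.2 []).foldl
          (fun index r => index.modify r [] (fun l => l ++ [p.1]))
          index)
      PySem.Dict.empty
  let pairs : PySem.Set (Int × Int) :=
    index.values.foldl
      (fun pairs gis =>
        (PySem.List.pyRange 0 (PySem.List.len gis) 1).foldl
          (fun pairs a =>
            (PySem.List.pyRange (a + 1) (PySem.List.len gis) 1).foldl
              (fun pairs b =>
                pairs.add (PySem.List.pyGetD gis a 0, PySem.List.pyGetD gis b 0))
              pairs)
          pairs)
      PySem.Set.empty
  (PySem.List.sorted2 pairs (fun p => p.1) (fun p => p.2)).map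
    (fun p => (PySem.List.pyGetD names p.1 "", PySem.List.pyGetD names p.2 ""))

-- ===== PRECONDITION & SPEC =====
-- Pre_ is the representation invariant of the Python argument dict[str, set[int]]:
-- distinct keys and, in each value, distinct residue ids.  Association lists with a
-- duplicated key or a duplicated residue are not the image of any Python input.
def Pre_detect_overlapping_groups_py (groups : List (String × List Int)) : Prop :=
  (groups.map Prod.fst).Nodup ∧ ∀ p ∈ groups, p.2.Nodup
instance (groups : List (String × List Int)) : Decidable (Pre_detect_overlapping_groups_py groups) := by
  unfold Pre_detect_overlapping_groups_py; infer_instance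

def pvWitness_detect_overlapping_groups_py : (List (String × List Int)) :=
  [("enzyme", [1, 2, 3]), ("polymer", [3, 4]), ("water", [9])]

def Spec_detect_overlapping_groups_py (groups : List (String × List Int)) (out : List (String × String)) : Prop := out = detect_overlapping_groups_py_alt groups
instance (groups : List (String × List Int)) (out : List (String × String)) : Decidable (Spec_detect_overlapping_groups_py groups out) := by unfold Spec_detect_overlapping_groups_py; infer_instance

-- ===== CLAIM (what is proved, stated in full; the proofs are below) =====
def Claim_equal_detect_overlapping_groups_py : Prop := ∀ (groups : List (String × List Int)), Dom_detect_overlapping_groups_py groups → Pre_detect_overlapping_groups_py groups → Spec_detect_overlapping_groups_py groups (detect_overlapping_groups_py groups)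

-- ===== LEMMAS AND PROOFS =====

-- Canonical description both ports are reduced to.
def pvName (groups : List (String × List Int)) (k : Nat) : String :=
  (groups.map Prod.fst).getD k ""
def pvVal (groups : List (String × List Int)) (k : Nat) : List Int :=
  (groups.getD k ("", [])).2
def pvOvl (groups : List (String × List Int)) (k j : Nat) : Bool :=
  (pvVal groups k).any (fun r => (pvVal groups j).contains r)
def pvJs (groups : List (String × List Int)) (k : Nat) : List Nat :=
  ((List.range groups.length).drop (k + 1)).filter (fun j => pvOvl groups k j)
def pvPairs (groups : List (String × List Int)) : List (Int × Int) :=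
  (List.range groups.length).flatMap
    (fun k => (pvJs groups k).map (fun (j : Nat) => ((k : Int), (j : Int))))
def pvOut (groups : List (String × List Int)) : List (String × String) :=
  (List.range groups.length).flatMap
    (fun k => (pvJs groups k).map (fun j => (pvName groups k, pvName groups j)))

-- generic helpers ------------------------------------------------------------

theorem pv_flatMap_congr {α β : Type} {l : List α} {f g : α → List β}
    (h : ∀ a ∈ l, f a = g a) : l.flatMap f = l.flatMap g := by
  induction l with
  | nil => simp
  | cons x xs ih =>
    simp only [List.flatMap_cons, h x (List.mem_cons_self), ih (fun a ha => h a (List.mem_cons_of_mem x ha))]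

theorem pv_enum_flatMap {α β : Type} (xs : List α) (d : α) (f : Int × α → List β) :
    ∀ s : Int, (PySem.List.enumerate xs s).flatMap f
      = (List.range xs.length).flatMap (fun (k : Nat) => f (s + (k : Int), xs.getD k d)) := by
  induction xs with
  | nil => intro s; simp [PySem.List.enumerate]
  | cons x xs ih =>
    intro s
    rw [PySem.List.enumerate_cons, List.flatMap_cons, ih (s + 1)]
    simp only [List.length_cons, List.range_succ_eq_map, List.flatMap_cons, List.flatMap_map]
    congr 1
    · simp
    · apply pv_flatMap_congr
      intro k _
      have h1 : s + ((k + 1 : Nat) : Int) = s + 1 + (k : Int) := by push_cast; ring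
      simp only [Nat.succ_eq_add_one, List.getD_cons_succ, h1]

theorem pv_self_eq_map_range {α : Type} (xs : List α) (d : α) :
    xs = (List.range xs.length).map (fun j => xs.getD j d) := by
  apply List.ext_getElem
  · simp
  · intro i h1 h2
    simp only [List.getElem_map, List.getElem_range]
    rw [List.getD_eq_getElem xs d h1]

theorem pv_mem_drop_range (n m j : Nat) :
    j ∈ (List.range n).drop m ↔ m ≤ j ∧ j < n := by
  constructor
  · intro h
    obtain ⟨i, hi, rfl⟩ := List.mem_iff_getElem.mp h
    simp only [List.getElem_drop, List.getElem_range]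
    simp [List.length_drop, List.length_range] at hi
    omega
  · intro ⟨h1, h2⟩
    apply List.mem_iff_getElem.mpr
    refine ⟨j - m, ?_, ?_⟩
    · simp [List.length_drop, List.length_range]; omega
    · simp only [List.getElem_drop, List.getElem_range]; omega

theorem pv_flatMap_if {α β : Type} (l : List α) (p : α → Bool) (f : α → β) :
    l.flatMap (fun x => if p x then [f x] else []) = (l.filter p).map f := by
  induction l with
  | nil => simp
  | cons x xs ih =>
    by_cases h : p x <;> simp [h, ih]

-- insertion sort (PySem.List.sorted2 on Int pairs) ---------------------------

def pvLexLe (a b : Int × Int) : Prop := a.1 < b.1 ∨ (a.1 = b.1 ∧ a.2 ≤ b.2)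
def pvLexLt (a b : Int × Int) : Prop := a.1 < b.1 ∨ (a.1 = b.1 ∧ a.2 < b.2)

theorem pv_insertBy_cons {α : Type} (before : α → α → Bool) (x y : α) (ys : List α) :
    PySem.List.insertBy before x (y :: ys)
      = if before x y then x :: y :: ys else y :: PySem.List.insertBy before x ys := by
  simp [PySem.List.insertBy]

theorem pv_pairwise_insertBy (before : (Int × Int) → (Int × Int) → Bool)
    (hT : ∀ a b, before a b = true → pvLexLe a b)
    (hF : ∀ a b, before a b = false → pvLexLe b a)
    (x : Int × Int) (acc : List (Int × Int)) (h : acc.Pairwise pvLexLe) :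
    (PySem.List.insertBy before x acc).Pairwise pvLexLe := by
  induction acc with
  | nil => simp [PySem.List.insertBy]
  | cons y ys ih =>
    rw [List.pairwise_cons] at h
    rw [pv_insertBy_cons]
    by_cases hb : before x y
    · rw [if_pos hb]
      refine List.Pairwise.cons ?_ (List.Pairwise.cons h.1 h.2)
      intro z hz
      rcases List.mem_cons.mp hz with rfl | hz
      · exact hT _ _ hb
      · have h1 : pvLexLe x z := by
          have h2 := hT _ _ hb
          have h3 := h.1 z hz
          unfold pvLexLe at *; omega
        exact h1
    · rw [if_neg hb]
      refine List.Pairwise.cons ?_ (ih h.2)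
      intro z hz
      rcases (PySem.List.mem_insertBy before x z ys).mp hz with rfl | hz
      · exact hF _ _ (by revert hb; cases before z y <;> simp)
      · exact h.1 z hz

theorem pv_pairwise_foldl (before : (Int × Int) → (Int × Int) → Bool)
    (hT : ∀ a b, before a b = true → pvLexLe a b)
    (hF : ∀ a b, before a b = false → pvLexLe b a)
    (xs : List (Int × Int)) :
    ∀ acc : List (Int × Int), acc.Pairwise pvLexLe →
      (xs.foldl (fun acc x => PySem.List.insertBy before x acc) acc).Pairwise pvLexLe := by
  induction xs with
  | nil => intro acc h; exact h
  | cons x xs ih =>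
    intro acc h
    exact ih _ (pv_pairwise_insertBy before hT hF x acc h)

theorem pv_sorted2_pairwise (xs : List (Int × Int)) :
    (PySem.List.sorted2 xs (fun p => p.1) (fun p => p.2)).Pairwise pvLexLe := by
  have e : PySem.List.sorted2 xs (fun p : Int × Int => p.1) (fun p => p.2)
      = xs.foldl (fun acc x => PySem.List.insertBy
          (fun a b => decide (a.1 < b.1) || (!decide (b.1 < a.1) && decide (a.2 < b.2))) x acc) [] := rfl
  rw [e]
  apply pv_pairwise_foldl
  · intro a b hab
    simp only [Bool.or_eq_true, Bool.and_eq_true, decide_eq_true_eq,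
      Bool.not_eq_true', decide_eq_false_iff_not] at hab
    unfold pvLexLe; omega
  · intro a b hab
    simp only [Bool.or_eq_false_iff, Bool.and_eq_false_iff, decide_eq_false_iff_not,
      Bool.not_eq_false', decide_eq_true_eq] at hab
    unfold pvLexLe; omega
  · exact List.Pairwise.nil

theorem pv_sorted2_eq (xs ys : List (Int × Int)) (hperm : ys.Perm xs)
    (hys : ys.Pairwise pvLexLt) :
    PySem.List.sorted2 xs (fun p => p.1) (fun p => p.2) = ys := by
  apply List.eq_of_perm_of_sorted (le := pvLexLe)
  · intro a b _ _ h1 h2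
    unfold pvLexLe at h1 h2
    ext <;> omega
  · exact pv_sorted2_pairwise xs
  · exact hys.imp (fun h => by unfold pvLexLt at h; unfold pvLexLe; omega)
  · exact (PySem.List.sorted2_perm xs _ _ _).trans hperm.symm

-- facts about the input ------------------------------------------------------

theorem pv_lookup (groups : List (String × List Int))
    (h : Pre_detect_overlapping_groups_py groups) (k : Nat) (hk : k < groups.length) :
    (PySem.Dict.mk groups).getD (pvName groups k) [] = pvVal groups k := by
  have hknd : (PySem.Dict.mk groups).keys.Nodup := h.1
  have hname : pvName groups k = (groups[k]).1 := by
    unfold pvName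
    rw [List.getD_eq_getElem _ _ (by simpa using hk), List.getElem_map]
  have hval : pvVal groups k = (groups[k]).2 := by
    unfold pvVal
    rw [List.getD_eq_getElem _ _ hk]
  rw [hname, hval]
  exact PySem.Dict.getD_of_mem_items (PySem.Dict.mk groups)
    (by simpa using List.getElem_mem hk) hknd []

theorem pv_cond (groups : List (String × List Int))
    (h : Pre_detect_overlapping_groups_py groups) (k j : Nat)
    (hk : k < groups.length) (hj : j < groups.length) :
    decide (PySem.Set.inter ((PySem.Dict.mk groups).getD (pvName groups k) [])
        ((PySem.Dict.mk groups).getD (pvName groups j) []) ≠ [])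
      = pvOvl groups k j := by
  rw [pv_lookup groups h k hk, pv_lookup groups h j hj]
  have hiff : (PySem.Set.inter (pvVal groups k) (pvVal groups j) ≠ [])
      ↔ (pvOvl groups k j = true) := by
    unfold pvOvl
    simp only [PySem.Set.inter, ne_eq, List.filter_eq_nil_iff, List.any_eq_true]
    push_neg
    constructor
    · rintro ⟨r, hr, hc⟩; exact ⟨r, hr, by simpa using hc⟩
    · rintro ⟨r, hr, hc⟩; exact ⟨r, hr, by simpa using hc⟩
  rcases hb : pvOvl groups k j with _ | _
  · simp only [decide_eq_false_iff_not]
    intro hne; have := hiff.mp hne; rw [hb] at this; exact Bool.false_ne_true this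
  · simp only [decide_eq_true_eq]
    exact hiff.mpr hb

theorem pvA_eq (groups : List (String × List Int))
    (h : Pre_detect_overlapping_groups_py groups) :
    detect_overlapping_groups_py groups = pvOut groups := by
  unfold detect_overlapping_groups_py
  simp only [PySem.List.foldl_append_ite, PySem.List.foldl_append_eq_flatMap,
    List.nil_append]
  rw [pv_enum_flatMap ((PySem.Dict.mk groups).keys) "" _ 0]
  unfold pvOut
  have hlen : (PySem.Dict.mk groups).keys.length = groups.length := List.length_map ..
  rw [hlen]
  apply pv_flatMap_congr
  intro k hk
  have hkn : k < groups.length := List.mem_range.mp hk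
  have hcast : (0 + (k : Int) + 1) = (((k + 1 : Nat)) : Int) := by push_cast; ring
  rw [hcast, PySem.List.slice_from_natCast]
  have hdrop : ((PySem.Dict.mk groups).keys).drop (k + 1)
      = ((List.range groups.length).drop (k + 1)).map
          (fun j => ((PySem.Dict.mk groups).keys).getD j "") := by
    conv_lhs => rw [pv_self_eq_map_range ((PySem.Dict.mk groups).keys) ""]
    rw [List.map_drop, hlen]
  rw [hdrop, List.filter_map, List.map_map]
  have hfc : ∀ j ∈ (List.range groups.length).drop (k + 1),
      ((fun g2 => decide (PySem.Set.inter
            ((PySem.Dict.mk groups).getD (((PySem.Dict.mk groups).keys).getD k "") [])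
            ((PySem.Dict.mk groups).getD g2 []) ≠ []))
        ∘ (fun j => ((PySem.Dict.mk groups).keys).getD j "")) j
      = pvOvl groups k j := by
    intro j hj
    have hjn : j < groups.length := ((pv_mem_drop_range _ _ _).mp hj).2
    exact pv_cond groups h k j hkn hjn
  rw [List.filter_congr hfc]
  rfl

-- B-side: inverted index, co-occurrence pairs, sort --------------------------

def pvLIST (groups : List (String × List Int)) : List (Int × Int) :=
  (List.range groups.length).flatMap
    (fun k => (pvVal groups k).map (fun r => (r, (k : Int))))
def pvIndex (groups : List (String × List Int)) : PySem.Dict Int (List Int) :=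
  (pvLIST groups).foldl
    (fun d q => d.modify q.1 [] (fun l => l ++ [q.2])) PySem.Dict.empty
def pvKs (groups : List (String × List Int)) (r : Int) : List Nat :=
  (List.range groups.length).filter (fun k => (pvVal groups k).contains r)
def pvOwners (groups : List (String × List Int)) (r : Int) : List Int :=
  (pvKs groups r).map (fun (k : Nat) => (k : Int))
def pvPairIdx (gis : List Int) : List (Int × Int) :=
  (PySem.List.pyRange 0 (PySem.List.len gis) 1).flatMap
    (fun a => (PySem.List.pyRange (a + 1) (PySem.List.len gis) 1).map
      (fun b => (PySem.List.pyGetD gis a 0, PySem.List.pyGetD gis b 0)))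
def pvBIG (groups : List (String × List Int)) : List (Int × Int) :=
  ((pvIndex groups).keys).flatMap (fun r => pvPairIdx (pvOwners groups r))

theorem pv_val_nodup (groups : List (String × List Int))
    (h : Pre_detect_overlapping_groups_py groups) (k : Nat) (hk : k < groups.length) :
    (pvVal groups k).Nodup := by
  have : groups.getD k ("", []) ∈ groups := by
    rw [List.getD_eq_getElem _ _ hk]; exact List.getElem_mem hk
  exact h.2 _ this

theorem pv_index_getD (groups : List (String × List Int))
    (h : Pre_detect_overlapping_groups_py groups) (r : Int) :
    (pvIndex groups).getD r [] = pvOwners groups r := by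
  unfold pvIndex
  rw [PySem.Dict.getD_foldl_modify_append, PySem.Dict.getD_empty, List.nil_append]
  unfold pvLIST pvOwners pvKs
  rw [List.filter_flatMap, List.map_flatMap]
  have step : ∀ k ∈ List.range groups.length,
      (fun k => List.map (fun x => x.2) (List.filter (fun p => p.1 == r)
        ((pvVal groups k).map (fun r' => (r', (k : Int)))))) k
      = (fun k => if (pvVal groups k).contains r then [((k : Nat) : Int)] else []) k := by
    intro k hk
    have hnd := pv_val_nodup groups h k (List.mem_range.mp hk)
    simp only [List.filter_map]
    have hcomp : ((fun p : Int × Int => p.1 == r) ∘ (fun r' => (r', (k : Int))))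
        = fun r' => r' == r := by funext r'; rfl
    rw [hcomp, List.filter_beq, List.map_map, List.map_replicate]
    by_cases hm : r ∈ pvVal groups k
    · rw [List.count_eq_one_of_mem hnd hm, if_pos (List.contains_iff_mem.mpr hm)]
      rfl
    · rw [List.count_eq_zero_of_not_mem hm,
        if_neg (fun hc => hm (List.contains_iff_mem.mp hc))]
      rfl
  rw [pv_flatMap_congr step,
    pv_flatMap_if (List.range groups.length)
      (fun k => (pvVal groups k).contains r) (fun (k : Nat) => (k : Int))]

theorem pv_nodup_keys (groups : List (String × List Int)) :
    (pvIndex groups).keys.Nodup := by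
  unfold pvIndex
  apply PySem.Dict.nodup_keys_foldl_modify_key
  simp [PySem.Dict.keys_empty]

theorem pv_mem_keys (groups : List (String × List Int)) (r : Int) :
    r ∈ (pvIndex groups).keys ↔ ∃ k, k < groups.length ∧ r ∈ pvVal groups k := by
  unfold pvIndex
  rw [PySem.Dict.keys_foldl_modify_key]
  rw [PySem.Dict.keys_empty]
  rw [show PySem.Set.update ([] : PySem.Set Int) ((pvLIST groups).map Prod.fst)
      = PySem.Set.ofList ((pvLIST groups).map Prod.fst) from rfl]
  rw [PySem.Set.mem_ofList]
  unfold pvLIST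
  simp only [List.mem_map, List.mem_flatMap, List.mem_range]
  constructor
  · rintro ⟨q, ⟨k, hk, hq⟩, rfl⟩
    obtain ⟨r', hr', rfl⟩ := hq
    exact ⟨k, hk, hr'⟩
  · rintro ⟨k, hk, hr⟩
    exact ⟨(r, (k : Int)), ⟨k, hk, ⟨r, hr, rfl⟩⟩, rfl⟩

theorem pv_values_eq (groups : List (String × List Int))
    (h : Pre_detect_overlapping_groups_py groups) :
    (pvIndex groups).values = ((pvIndex groups).keys).map (pvOwners groups) := by
  rw [PySem.Dict.values_eq_map_keys (pvIndex groups) (pv_nodup_keys groups) []]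
  apply List.map_congr_left
  intro r _
  exact pv_index_getD groups h r

theorem pv_mem_pairIdx (ks : List Nat) (hks : ks.Pairwise (· < ·)) (x : Int × Int) :
    x ∈ pvPairIdx (ks.map (fun (k : Nat) => (k : Int)))
      ↔ ∃ i j : Nat, i ∈ ks ∧ j ∈ ks ∧ i < j ∧ x = ((i : Int), (j : Int)) := by
  have hlen : PySem.List.len (ks.map (fun (k : Nat) => (k : Int))) = (ks.length : Int) := by
    rw [PySem.List.len_eq, List.length_map]
  unfold pvPairIdx
  rw [hlen]
  constructor
  · intro hx
    obtain ⟨a, ha, hx⟩ := List.mem_flatMap.mp hx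
    obtain ⟨b, hb, rfl⟩ := List.mem_map.mp hx
    obtain ⟨ha0, haL⟩ := PySem.List.mem_pyRange_one.mp ha
    obtain ⟨hb1, hbL⟩ := PySem.List.mem_pyRange_one.mp hb
    have haN : a.toNat < ks.length := by omega
    have hbN : b.toNat < ks.length := by omega
    rw [PySem.List.pyGetD_eq_getElem _ _ ha0 (by rw [List.length_map]; omega),
        PySem.List.pyGetD_eq_getElem _ _ (by omega) (by rw [List.length_map]; omega)]
    refine ⟨ks[a.toNat], ks[b.toNat], List.getElem_mem haN, List.getElem_mem hbN,
      (List.pairwise_iff_getElem.mp hks) _ _ haN hbN (by omega), ?_⟩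
    simp only [List.getElem_map]
  · rintro ⟨i, j, hi, hj, hij, rfl⟩
    obtain ⟨ai, hai, ei⟩ := List.mem_iff_getElem.mp hi
    obtain ⟨bj, hbj, ej⟩ := List.mem_iff_getElem.mp hj
    have hab : ai < bj := by
      rcases Nat.lt_trichotomy ai bj with hlt | heq | hgt
      · exact hlt
      · exfalso; subst heq; rw [ei] at ej; omega
      · exact absurd ((List.pairwise_iff_getElem.mp hks) _ _ hbj hai hgt) (by omega)
    apply List.mem_flatMap.mpr
    refine ⟨(ai : Int), PySem.List.mem_pyRange_one.mpr ⟨by omega, by omega⟩, ?_⟩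
    apply List.mem_map.mpr
    refine ⟨(bj : Int), PySem.List.mem_pyRange_one.mpr ⟨by omega, by omega⟩, ?_⟩
    rw [PySem.List.pyGetD_eq_getElem _ _ (by omega) (by rw [List.length_map]; omega),
        PySem.List.pyGetD_eq_getElem _ _ (by omega) (by rw [List.length_map]; omega)]
    simp only [Int.toNat_natCast, List.getElem_map]
    rw [ei, ej]

theorem pv_ks_pairwise (groups : List (String × List Int)) (r : Int) :
    (pvKs groups r).Pairwise (· < ·) :=
  List.Pairwise.filter _ List.pairwise_lt_range

theorem pv_mem_pvPairs (groups : List (String × List Int)) (x : Int × Int) :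
    x ∈ pvPairs groups ↔ ∃ i j : Nat, i < j ∧ j < groups.length ∧
      pvOvl groups i j = true ∧ x = ((i : Int), (j : Int)) := by
  unfold pvPairs pvJs
  simp only [List.mem_flatMap, List.mem_map, List.mem_filter, List.mem_range]
  constructor
  · rintro ⟨k, hk, j, ⟨hjd, hov⟩, rfl⟩
    have := (pv_mem_drop_range _ _ _).mp hjd
    exact ⟨k, j, by omega, by omega, hov, rfl⟩
  · rintro ⟨i, j, hij, hjn, hov, rfl⟩
    exact ⟨i, by omega, j, ⟨(pv_mem_drop_range _ _ _).mpr ⟨by omega, hjn⟩, hov⟩, rfl⟩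

theorem pv_mem_big_iff (groups : List (String × List Int))
    (h : Pre_detect_overlapping_groups_py groups) (x : Int × Int) :
    x ∈ pvBIG groups ↔ x ∈ pvPairs groups := by
  unfold pvBIG
  rw [List.mem_flatMap, pv_mem_pvPairs]
  constructor
  · rintro ⟨r, hr, hx⟩
    obtain ⟨i, j, hi, hj, hij, rfl⟩ :=
      (pv_mem_pairIdx (pvKs groups r) (pv_ks_pairwise groups r) x).mp hx
    have hi' := List.mem_filter.mp hi
    have hj' := List.mem_filter.mp hj
    refine ⟨i, j, hij, List.mem_range.mp hj'.1, ?_, rfl⟩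
    unfold pvOvl
    rw [List.any_eq_true]
    exact ⟨r, List.contains_iff_mem.mp hi'.2, hj'.2⟩
  · rintro ⟨i, j, hij, hjn, hov, rfl⟩
    unfold pvOvl at hov
    rw [List.any_eq_true] at hov
    obtain ⟨r, hri, hrj⟩ := hov
    refine ⟨r, (pv_mem_keys groups r).mpr ⟨i, by omega, hri⟩, ?_⟩
    apply (pv_mem_pairIdx (pvKs groups r) (pv_ks_pairwise groups r) _).mpr
    refine ⟨i, j, ?_, ?_, hij, rfl⟩
    · exact List.mem_filter.mpr ⟨List.mem_range.mpr (by omega),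
        List.contains_iff_mem.mpr hri⟩
    · exact List.mem_filter.mpr ⟨List.mem_range.mpr hjn, hrj⟩

theorem pv_pairs_pairwise (groups : List (String × List Int)) :
    (pvPairs groups).Pairwise pvLexLt := by
  unfold pvPairs
  rw [List.pairwise_flatMap]
  constructor
  · intro k _
    rw [List.pairwise_map]
    have hp : (pvJs groups k).Pairwise (· < ·) :=
      List.Pairwise.filter _ (List.Pairwise.drop List.pairwise_lt_range)
    exact hp.imp (fun hab => Or.inr ⟨rfl, by simpa using hab⟩)
  · refine List.pairwise_lt_range.imp ?_
    intro k1 k2 hk x hx y hy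
    obtain ⟨j1, _, rfl⟩ := List.mem_map.mp hx
    obtain ⟨j2, _, rfl⟩ := List.mem_map.mp hy
    exact Or.inl (by simpa using hk)

theorem pv_pairs_nodup (groups : List (String × List Int)) :
    (pvPairs groups).Nodup :=
  (pv_pairs_pairwise groups).imp (fun hab => by
    rintro rfl
    unfold pvLexLt at hab
    omega)

theorem pv_sorted_big (groups : List (String × List Int))
    (h : Pre_detect_overlapping_groups_py groups) :
    PySem.List.sorted2 (PySem.Set.ofList (pvBIG groups))
      (fun p => p.1) (fun p => p.2) = pvPairs groups := by
  apply pv_sorted2_eq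
  · apply (List.perm_ext_iff_of_nodup (pv_pairs_nodup groups)
      (PySem.Set.nodup_ofList _)).mpr
    intro a
    rw [PySem.Set.mem_ofList]
    exact (pv_mem_big_iff groups h a).symm
  · exact pv_pairs_pairwise groups

theorem pvB_eq (groups : List (String × List Int))
    (h : Pre_detect_overlapping_groups_py groups) :
    detect_overlapping_groups_py_alt groups = pvOut groups := by
  unfold detect_overlapping_groups_py_alt
  dsimp only
  rw [show (PySem.Dict.mk groups).keys = groups.map Prod.fst from rfl]
  have hidx : (PySem.List.enumerate (groups.map Prod.fst)).foldl
      (fun index p => ((PySem.Dict.mk groups).getD p.2 []).foldl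
        (fun index r => index.modify r [] (fun l => l ++ [p.1])) index)
      PySem.Dict.empty
      = pvIndex groups := by
    have e1 : ((PySem.List.enumerate (groups.map Prod.fst)).flatMap
        (fun p => ((PySem.Dict.mk groups).getD p.2 []).map (fun r => (r, p.1)))).foldl
        (fun index q => index.modify q.1 [] (fun l => l ++ [q.2])) PySem.Dict.empty
        = (PySem.List.enumerate (groups.map Prod.fst)).foldl
          (fun index p => ((PySem.Dict.mk groups).getD p.2 []).foldl
            (fun index r => index.modify r [] (fun l => l ++ [p.1])) index)
          PySem.Dict.empty := by
      rw [List.foldl_flatMap]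
      simp only [List.foldl_map]
    rw [← e1]
    unfold pvIndex
    congr 1
    rw [pv_enum_flatMap (groups.map Prod.fst) "" _ 0]
    rw [show (groups.map Prod.fst).length = groups.length from List.length_map ..]
    apply pv_flatMap_congr
    intro k hk
    have hkn := List.mem_range.mp hk
    rw [show ((PySem.Dict.mk groups).getD ((groups.map Prod.fst).getD k "") [])
        = pvVal groups k from pv_lookup groups h k hkn]
    simp
  rw [hidx, pv_values_eq groups h]
  have e2 : ((((pvIndex groups).keys).map (pvOwners groups)).flatMap pvPairIdx).foldl
      PySem.Set.add PySem.Set.empty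
      = (((pvIndex groups).keys).map (pvOwners groups)).foldl
        (fun pairs gis =>
          (PySem.List.pyRange 0 (PySem.List.len gis) 1).foldl
            (fun pairs a =>
              (PySem.List.pyRange (a + 1) (PySem.List.len gis) 1).foldl
                (fun pairs b =>
                  pairs.add (PySem.List.pyGetD gis a 0, PySem.List.pyGetD gis b 0))
                pairs)
            pairs)
        PySem.Set.empty := by
    rw [List.foldl_flatMap]
    unfold pvPairIdx
    simp only [List.foldl_flatMap, List.foldl_map]
  rw [← e2, List.flatMap_map]
  rw [show (((pvIndex groups).keys).flatMap (fun a => pvPairIdx (pvOwners groups a))).foldl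
      PySem.Set.add PySem.Set.empty = PySem.Set.ofList (pvBIG groups) from rfl]
  rw [pv_sorted_big groups h]
  unfold pvPairs pvOut
  rw [List.map_flatMap]
  apply pv_flatMap_congr
  intro k _
  rw [List.map_map]
  apply List.map_congr_left
  intro j _
  simp only [Function.comp, PySem.List.pyGetD_natCast]
  rfl

-- ===== VERDICT (by name: the statement is the Claim_ definition above) =====
theorem detect_overlapping_groups_py_spec : Claim_equal_detect_overlapping_groups_py := by
  intro groups _ hpre
  unfold Spec_detect_overlapping_groups_py
  rw [pvA_eq groups hpre, pvB_eq groups hpre]
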